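-- pv_equiv track=rewrite | github.com/vini52/Exercicios_PI_Python | ece/lista5/lista5_1.py | encontrar_menor
-- ===== SOURCE A (Python) =====
-- def encontrar_menor(m:list) -> int:
--     menor = int(m[0][0])
--     for num in m[0]:
--         if int(num) < menor:
--             menor = int(num)
--     for num in m[-1]:
--         if int(num) < menor:
--             menor = int(num)
--     for i in range(len(m)):
--         for j in range(len(m[0]) - 2, 0, -1):
--             if i + j == len(m[0]) - 1:
--                 if menor > int(m[i][j]):
--                     menor = int(m[i][j])
--     return menor
-- ===== SOURCE B (Python) =====
-- def encontrar_menor(m: list) -> int: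
--     cols = len(m[0])
--     cands = list(m[0]) + list(m[-1])
--     for i in range(len(m)):
--         j = cols - 1 - i
--         if 1 <= j <= cols - 2:
--             cands.append(int(m[i][j]))
--     return min(int(x) for x in cands)
-- ===== Notes on version B (the rewrite author's own statement) =====
-- stated objective: faster
-- what changed: B replaces A's nested scan over all (i,j) pairs looking for i+j==cols-1 with the direct anti-diagonal index j=cols-1-i per row plus a single min() over first row, last row and those cells.
import Mathlib
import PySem

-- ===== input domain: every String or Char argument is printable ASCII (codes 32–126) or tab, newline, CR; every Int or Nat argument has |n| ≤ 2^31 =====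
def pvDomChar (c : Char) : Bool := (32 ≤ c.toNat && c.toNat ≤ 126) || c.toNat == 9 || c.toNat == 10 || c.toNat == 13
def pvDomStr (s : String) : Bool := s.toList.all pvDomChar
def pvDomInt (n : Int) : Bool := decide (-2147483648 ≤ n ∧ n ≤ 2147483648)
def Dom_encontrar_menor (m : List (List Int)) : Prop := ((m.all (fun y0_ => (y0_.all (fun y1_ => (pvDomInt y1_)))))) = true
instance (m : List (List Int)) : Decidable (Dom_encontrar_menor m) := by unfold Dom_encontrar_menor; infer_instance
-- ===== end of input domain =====

-- B computes the same minimum (first row, last row, interior anti-diagonal cells) by direct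
-- indexing j = cols-1-i per row instead of A's nested scan over all (i,j) pairs.

-- ===== PORT A =====
def encontrar_menor (m : List (List Int)) : Int :=
  -- menor = int(m[0][0])
  let row0 : List Int := (PySem.List.pyGet? m 0).getD []
  let menor0 : Int := (PySem.List.pyGet? row0 0).getD 0
  -- for num in m[0]: if int(num) < menor: menor = int(num)
  let menor1 : Int := row0.foldl (fun menor num => if num < menor then num else menor) menor0
  -- for num in m[-1]: if int(num) < menor: menor = int(num)
  let menor2 : Int := ((PySem.List.pyGet? m (-1)).getD []).foldl
      (fun menor num => if num < menor then num else menor) menor1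
  -- for i in range(len(m)): for j in range(len(m[0]) - 2, 0, -1):
  --   if i + j == len(m[0]) - 1: if menor > int(m[i][j]): menor = int(m[i][j])
  (PySem.List.pyRange 0 (m.length : Int) 1).foldl (fun menor i =>
    (PySem.List.pyRange ((row0.length : Int) - 2) 0 (-1)).foldl (fun menor j =>
      if i + j = (row0.length : Int) - 1 then
        let v : Int := PySem.List.pyGetD (PySem.List.pyGetD m i []) j 0
        if menor > v then v else menor
      else menor) menor) menor2

-- ===== PORT B =====
def encontrar_menor_alt (m : List (List Int)) : Int :=
  -- cols = len(m[0]); cands = list(m[0]) + list(m[-1])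
  let row0 : List Int := (PySem.List.pyGet? m 0).getD []
  let cols : Int := (row0.length : Int)
  let lastRow : List Int := (PySem.List.pyGet? m (-1)).getD []
  -- for i in range(len(m)): j = cols-1-i; if 1 <= j <= cols-2: cands.append(m[i][j])
  let diag : List Int := (PySem.List.pyRange 0 (m.length : Int) 1).filterMap (fun i =>
    let j := cols - 1 - i
    if 1 ≤ j ∧ j ≤ cols - 2 then some (PySem.List.pyGetD (PySem.List.pyGetD m i []) j 0) else none)
  -- return min(cands)
  (PySem.List.min? (row0 ++ lastRow ++ diag) (fun x => x)).getD 0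

-- ===== PRECONDITION & SPEC =====
-- Pre_: exactly where Python A returns: the matrix and its first row are nonempty, and every
-- interior anti-diagonal cell A reads (j = cols-1-i with 1 ≤ j ≤ cols-2) lies within its row.
def Pre_encontrar_menor (m : List (List Int)) : Prop :=
  m ≠ [] ∧ (m.headD []) ≠ [] ∧
  ∀ i : Nat, i < m.length →
    (1 ≤ ((m.headD []).length : Int) - 1 - (i : Int) ∧
     ((m.headD []).length : Int) - 1 - (i : Int) ≤ ((m.headD []).length : Int) - 2) →
    ((m.headD []).length : Int) - 1 - (i : Int) < ((m.getD i []).length : Int)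
instance (m : List (List Int)) : Decidable (Pre_encontrar_menor m) := by
  unfold Pre_encontrar_menor; infer_instance

def pvWitness_encontrar_menor : List (List Int) := [[5, 2, 7], [4, 9, 6], [1, 8, 3]]

def Spec_encontrar_menor (m : List (List Int)) (out : Int) : Prop := out = encontrar_menor_alt m
instance (m : List (List Int)) (out : Int) : Decidable (Spec_encontrar_menor m out) := by
  unfold Spec_encontrar_menor; infer_instance

-- ===== CLAIM (what is proved, stated in full; the proofs are below) =====
def Claim_equal_encontrar_menor : Prop := ∀ (m : List (List Int)), Dom_encontrar_menor m → Pre_encontrar_menor m → Spec_encontrar_menor m (encontrar_menor m)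

-- ===== LEMMAS AND PROOFS =====

-- A's "if num < menor then num else menor" is `min menor num`.
lemma pvStep_eq_min : (fun (a b : Int) => if b < a then b else a) = (fun a b => min a b) := by
  funext a b; by_cases h : b < a <;> simp [min_def, h] <;> omega

-- a guarded fold that fires on exactly one (duplicate-free) element of the range
lemma pvFoldl_guard (L : List Int) (c : Int) (g : Int → Int → Int) (hnd : L.Nodup) (init : Int) :
    L.foldl (fun acc j => if j = c then g j acc else acc) init
      = if c ∈ L then g c init else init := by
  induction L generalizing init with
  | nil => simp
  | cons a L ih =>
    rcases List.nodup_cons.mp hnd with ⟨ha, hL⟩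
    by_cases h : a = c
    · subst h
      simp only [List.foldl_cons, ih hL, List.mem_cons, true_or, if_pos]
      simp [ha]
    · simp only [List.foldl_cons, if_neg h, ih hL, List.mem_cons]
      have : (c = a ∨ c ∈ L) ↔ c ∈ L := by
        constructor
        · rintro (rfl | hc)
          · exact absurd rfl h
          · exact hc
        · exact Or.inr
      simp [this]

-- folding `min` over a filterMap equals the guarded accumulation over the source list
lemma pvFoldl_min_filterMap (L : List Int) (f : Int → Option Int) (init : Int) :
    L.foldl (fun acc i => match f i with | some v => min acc v | none => acc) init
      = (L.filterMap f).foldl min init := by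
  induction L generalizing init with
  | nil => simp
  | cons a L ih =>
    cases h : f a <;> simp [h, ih]

-- A's inner loop for a fixed row i picks out exactly the cell at column cols-1-i (when interior)
lemma pvInner (m : List (List Int)) (cols i acc : Int) :
    (PySem.List.pyRange (cols - 2) 0 (-1)).foldl (fun menor j =>
        if i + j = cols - 1 then
          let v : Int := PySem.List.pyGetD (PySem.List.pyGetD m i []) j 0
          if menor > v then v else menor
        else menor) acc
      = match (if 1 ≤ cols - 1 - i ∧ cols - 1 - i ≤ cols - 2 then
                 some (PySem.List.pyGetD (PySem.List.pyGetD m i []) (cols - 1 - i) 0)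
               else none) with
        | some v => min acc v
        | none => acc := by
  have hnd : (PySem.List.pyRange (cols - 2) 0 (-1)).Nodup := by
    rw [PySem.List.pyRange_neg_one_eq_reverse]
    exact (List.nodup_reverse).mpr (PySem.List.nodup_pyRange_one _ _)
  have hfun : (fun (menor j : Int) =>
        if i + j = cols - 1 then
          let v : Int := PySem.List.pyGetD (PySem.List.pyGetD m i []) j 0
          if menor > v then v else menor
        else menor)
      = (fun menor j => if j = cols - 1 - i then
          (fun (j' : Int) (acc' : Int) => min acc' (PySem.List.pyGetD (PySem.List.pyGetD m i []) j' 0)) j menor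
        else menor) := by
    funext menor j
    by_cases h : i + j = cols - 1
    · have hj : j = cols - 1 - i := by omega
      simp only [if_pos h, if_pos hj]
      by_cases hlt : menor > PySem.List.pyGetD (PySem.List.pyGetD m i []) j 0 <;>
        simp [min_def, hlt] <;> omega
    · have hj : ¬ (j = cols - 1 - i) := by omega
      simp [h, hj]
  rw [hfun, pvFoldl_guard _ _ _ hnd]
  simp only [PySem.List.mem_pyRange_neg_one]
  by_cases hc : 1 ≤ cols - 1 - i ∧ cols - 1 - i ≤ cols - 2
  · rw [if_pos (by omega : 0 < cols - 1 - i ∧ cols - 1 - i ≤ cols - 2), if_pos hc]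
  · rw [if_neg (by omega), if_neg hc]

-- ===== VERDICT (by name: the statement is the Claim_ definition above) =====
theorem encontrar_menor_spec : Claim_equal_encontrar_menor := by
  intro m _ hpre
  obtain ⟨hm, hr0, -⟩ := hpre
  unfold Spec_encontrar_menor encontrar_menor encontrar_menor_alt
  obtain ⟨r0, rest, rfl⟩ : ∃ r0 rest, m = r0 :: rest := by
    cases m with
    | nil => exact absurd rfl hm
    | cons r0 rest => exact ⟨r0, rest, rfl⟩
  obtain ⟨a, t, rfl⟩ : ∃ a t, r0 = a :: t := by
    cases hr' : r0 with
    | nil => rw [List.headD_cons, hr'] at hr0; exact absurd rfl hr0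
    | cons a t => exact ⟨a, t, rfl⟩
  have hrow0 : (PySem.List.pyGet? ((a::t)::rest) 0).getD [] = a :: t := by simp [pysem]
  have ha : (PySem.List.pyGet? (a::t) 0).getD 0 = a := by simp [pysem]
  simp only [hrow0, ha, pvStep_eq_min]
  have hfun : (fun (menor i : Int) =>
      (PySem.List.pyRange (((a::t).length : Int) - 2) 0 (-1)).foldl (fun menor j =>
        if i + j = ((a::t).length : Int) - 1 then
          if menor > PySem.List.pyGetD (PySem.List.pyGetD ((a::t)::rest) i []) j 0 then
            PySem.List.pyGetD (PySem.List.pyGetD ((a::t)::rest) i []) j 0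
          else menor
        else menor) menor)
    = (fun (menor i : Int) =>
        match (if 1 ≤ ((a::t).length : Int) - 1 - i ∧ ((a::t).length : Int) - 1 - i ≤ ((a::t).length : Int) - 2 then
                 some (PySem.List.pyGetD (PySem.List.pyGetD ((a::t)::rest) i []) (((a::t).length : Int) - 1 - i) 0)
               else none) with
        | some v => min menor v
        | none => menor) := by
    funext menor i
    exact pvInner ((a::t)::rest) (((a::t).length : Int)) i menor
  rw [hfun, pvFoldl_min_filterMap]
  simp only [List.cons_append]
  rw [PySem.List.min?_id_cons]
  simp [List.foldl_append, min_self]
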